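-- pv_equiv track=rewrite | github.com/Unofficial-SchoolMouv/schoolmouv-python | schoolmouv.py | relevant_filename
-- ===== SOURCE A (Python) =====
-- def relevant_filename(url: str):
--     _ = ''
--     __ = url.split('/')[-2].capitalize().replace('-',' ')
--     already_done = 0
--     for caract in __:
--         if already_done == 0 and caract.isnumeric():
--             _ += ' '+caract
--             already_done+=1
--         else:
--             _ += caract
--     _ = _.replace('  ',' ')
--     return _+'pdf' if url.endswith('.pdf') else _+'.mp4'
-- ===== SOURCE B (Python) =====
-- def relevant_filename(url: str):
--     suffix = 'pdf' if url.endswith('.pdf') else '.mp4'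
--     segment = url.split('/')[-2].capitalize().replace('-', ' ')
--
--     def spaced(s):
--         if not s:
--             return ''
--         if s[0].isnumeric():
--             return ' ' + s
--         return s[0] + spaced(s[1:])
--
--     return spaced(segment).replace('  ', ' ') + suffix
-- ===== Notes on version B (the rewrite author's own statement) =====
-- stated objective: simpler
-- what changed: Replaces the imperative character loop with an already_done integer flag by a recursive helper that copies characters until the first numeric character and then prepends one space to the whole remaining tail in a single step; the suffix choice is hoisted to the top and the single double-space-to-space replace is kept verbatim.
import Mathlib
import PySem

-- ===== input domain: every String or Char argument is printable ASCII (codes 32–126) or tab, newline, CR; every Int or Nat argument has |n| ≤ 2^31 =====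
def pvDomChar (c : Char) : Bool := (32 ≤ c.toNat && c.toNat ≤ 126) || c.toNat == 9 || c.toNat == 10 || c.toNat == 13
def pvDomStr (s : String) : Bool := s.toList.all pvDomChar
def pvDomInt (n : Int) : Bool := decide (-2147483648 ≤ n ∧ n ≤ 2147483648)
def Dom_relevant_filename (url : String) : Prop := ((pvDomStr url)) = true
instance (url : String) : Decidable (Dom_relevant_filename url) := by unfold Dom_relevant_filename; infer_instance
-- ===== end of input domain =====

-- B replaces A's flag-tracking character loop by a recursive copy-until-first-digit helper that prepends one space to the tail, with the suffix hoisted (objective: simpler).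

-- Python str.capitalize, ported by hand: exact on the ASCII domain (first char uppercased, rest lowered)
def pyCapitalize (l : List Char) : List Char :=
  match l with
  | [] => []
  | c :: cs => PySem.Chars.upperChar c :: cs.map PySem.Chars.lowerChar

-- Python str.isnumeric on a single char, ported by hand: exact on ASCII (coincides with isdigit there)
def pyIsNumeric (c : Char) : Bool := PySem.Chars.isdigit c

-- ===== PORT A =====
def relevant_filename (url : String) : String :=
  match PySem.List.pyGet? ((PySem.Str.split? url "/").getD []) (-2) with
  | none => ""   -- Python raises IndexError here; excluded by Pre_
  | some seg =>
    let seg2 := PySem.Chars.replace (pyCapitalize seg.toList) "-".toList " ".toList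
    let st := seg2.foldl (fun (st : List Char × Int) c =>
      if st.2 == 0 && pyIsNumeric c then (st.1 ++ [' ', c], st.2 + 1)
      else (st.1 ++ [c], st.2)) ([], 0)
    let res := PySem.Chars.replace st.1 "  ".toList " ".toList
    if PySem.Str.endswith url ".pdf" then String.ofList res ++ "pdf"
    else String.ofList res ++ ".mp4"

-- ===== PORT B =====
-- Source B's recursive helper 'spaced': copy chars until the first numeric one, then ' ' ++ rest
def spacedChars : List Char → List Char
  | [] => []
  | c :: cs => if pyIsNumeric c then ' ' :: c :: cs else c :: spacedChars cs

def relevant_filename_alt (url : String) : String :=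
  let suffix := if PySem.Str.endswith url ".pdf" then "pdf" else ".mp4"
  match PySem.List.pyGet? ((PySem.Str.split? url "/").getD []) (-2) with
  | none => ""   -- Python raises IndexError here; excluded by Pre_
  | some seg =>
    let segment := PySem.Chars.replace (pyCapitalize seg.toList) "-".toList " ".toList
    String.ofList (PySem.Chars.replace (spacedChars segment) "  ".toList " ".toList) ++ suffix

-- ===== PRECONDITION & SPEC =====
-- Pre_ excludes exactly the urls containing no slash, on which A's second-to-last split segment lookup raises IndexError.
def Pre_relevant_filename (url : String) : Prop := PySem.Str.isIn "/" url = true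
instance (url : String) : Decidable (Pre_relevant_filename url) := by unfold Pre_relevant_filename; infer_instance
def pvWitness_relevant_filename : String := "site/my-lesson-6eme/video.mp4"
def Spec_relevant_filename (url : String) (out : String) : Prop := out = relevant_filename_alt url
instance (url : String) (out : String) : Decidable (Spec_relevant_filename url out) := by unfold Spec_relevant_filename; infer_instance

-- ===== CLAIM (what is proved, stated in full; the proofs are below) =====
def Claim_equal_relevant_filename : Prop := ∀ (url : String), Dom_relevant_filename url → Pre_relevant_filename url → Spec_relevant_filename url (relevant_filename url)

-- ===== LEMMAS AND PROOFS =====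

-- A's loop step
def aStep (st : List Char × Int) (c : Char) : List Char × Int :=
  if st.2 == 0 && pyIsNumeric c then (st.1 ++ [' ', c], st.2 + 1)
  else (st.1 ++ [c], st.2)

lemma foldl_aStep_done (l : List Char) (acc : List Char) (n : Int) (hn : n ≠ 0) :
    (l.foldl aStep (acc, n)).1 = acc ++ l := by
  induction l generalizing acc with
  | nil => simp
  | cons c cs ih =>
    simp only [List.foldl_cons, aStep]
    have h0 : (n == 0) = false := by simp [hn]
    simp [h0, ih (acc ++ [c])]

lemma foldl_aStep_zero (l : List Char) (acc : List Char) :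
    (l.foldl aStep (acc, 0)).1 = acc ++ spacedChars l := by
  induction l generalizing acc with
  | nil => simp [spacedChars]
  | cons c cs ih =>
    simp only [List.foldl_cons, spacedChars]
    by_cases h : pyIsNumeric c = true
    · rw [show aStep (acc, 0) c = (acc ++ [' ', c], (1 : Int)) by simp [aStep, h]]
      rw [foldl_aStep_done cs (acc ++ [' ', c]) 1 (by norm_num)]
      simp [h]
    · simp only [Bool.not_eq_true] at h
      rw [show aStep (acc, 0) c = (acc ++ [c], (0 : Int)) by simp [aStep, h]]
      simp [h, ih (acc ++ [c])]

-- the loop of A (with the literal lambda of the port) computes B's recursive spacedChars result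
lemma key (l : List Char) (acc : List Char) :
    (l.foldl (fun (st : List Char × Int) c =>
      if st.2 == 0 && pyIsNumeric c then (st.1 ++ [' ', c], st.2 + 1)
      else (st.1 ++ [c], st.2)) (acc, 0)).1 = acc ++ spacedChars l :=
  foldl_aStep_zero l acc

-- ===== VERDICT (by name: the statement is the Claim_ definition above) =====
theorem relevant_filename_spec : Claim_equal_relevant_filename := by
  intro url _ _
  unfold Spec_relevant_filename relevant_filename relevant_filename_alt
  cases hget : PySem.List.pyGet? ((PySem.Str.split? url "/").getD []) (-2) with
  | none => rfl
  | some seg =>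
    simp only [key, List.nil_append]
    split_ifs <;> rfl
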